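-- pv_equiv track=rewrite | github.com/ducminhgd/leetcode-solutions | medium/2975/main.py | patto_bear
-- ===== SOURCE A (Python) =====
-- MOD = 10**9 + 7
--
-- def patto_bear(m: int, n: int, h_fences: list[int], v_fences: list[int]) -> int:
--     """
--     Solution from PattoBear on leetcode
--     https://leetcode.com/problems/maximum-square-area-by-removing-fences-from-a-field/solutions/7498442/golang-good-ass-hints-by-pattobears-mq85/
--     """
--     h_fences = h_fences + [1, m]
--     v_fences = v_fences + [1, n]
--
--     diff_set = set()
--     for i in range(len(h_fences) - 1):
--         for j in range(i + 1, len(h_fences)):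
--             diff_set.add(abs(h_fences[i] - h_fences[j]))
--
--     out = -1
--     for i in range(len(v_fences) - 1):
--         for j in range(i + 1, len(v_fences)):
--             side = abs(v_fences[i] - v_fences[j])
--             if side in diff_set:
--                 out = max(out, side * side)
--
--     return out % MOD if out != -1 else -1
-- ===== SOURCE B (Python) =====
-- MOD = 10**9 + 7
--
-- def patto_bear(m: int, n: int, h_fences: list[int], v_fences: list[int]) -> int:
--     def gaps(pts):
--         ds = set()
--         while pts:
--             p, pts = pts[0], pts[1:]
--             ds |= {q - p for q in pts}
--         return ds
--
--     def sides_desc(fences, edge):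
--         return sorted(gaps(sorted(fences + [1, edge])), reverse=True)
--
--     hs = sides_desc(h_fences, m)
--     vs = sides_desc(v_fences, n)
--     i = j = 0
--     while i < len(hs) and j < len(vs):
--         if hs[i] == vs[j]:
--             return hs[i] * hs[i] % MOD
--         if hs[i] > vs[j]:
--             i += 1
--         else:
--             j += 1
--     return -1
-- ===== Notes on version B (the rewrite author's own statement) =====
-- stated objective: alternative
-- what changed: B sorts each augmented fence list so gaps need no abs, sorts each distinct gap set descending, and finds the largest common gap by a two-pointer merge of the two sorted lists with early exit at the first (largest) match, replacing A's hash-set membership test with a running max of areas inside the second nested loop.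
import Mathlib
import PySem

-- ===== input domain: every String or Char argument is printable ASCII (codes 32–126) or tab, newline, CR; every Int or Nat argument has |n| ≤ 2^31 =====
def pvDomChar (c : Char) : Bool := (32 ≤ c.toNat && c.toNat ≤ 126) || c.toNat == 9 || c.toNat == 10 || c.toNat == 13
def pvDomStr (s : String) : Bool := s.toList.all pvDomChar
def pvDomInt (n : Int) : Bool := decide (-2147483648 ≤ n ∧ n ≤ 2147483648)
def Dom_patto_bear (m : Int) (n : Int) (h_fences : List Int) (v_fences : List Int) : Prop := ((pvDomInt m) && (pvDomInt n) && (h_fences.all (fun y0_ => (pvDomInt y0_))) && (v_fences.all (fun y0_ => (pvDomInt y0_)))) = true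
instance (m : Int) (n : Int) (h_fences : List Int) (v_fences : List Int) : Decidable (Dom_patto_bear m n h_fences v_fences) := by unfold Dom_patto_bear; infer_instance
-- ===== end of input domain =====

-- B sorts each augmented fence list, collects its gap lengths, and finds the largest
-- common gap by a two-pointer merge of the two strictly descending sorted gap lists,
-- instead of A's hash-set membership test with a running max (objective: alternative).

def pvMOD : Int := 10 ^ 9 + 7

-- ===== PORT A =====
def patto_bear (m : Int) (n : Int) (h_fences : List Int) (v_fences : List Int) : Int :=
  let hf := h_fences ++ [1, m]
  let vf := v_fences ++ [1, n]
  let diffSet : PySem.Set Int :=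
    (PySem.List.pyRange 0 (PySem.List.len hf - 1)).foldl
      (fun s i => (PySem.List.pyRange (i + 1) (PySem.List.len hf)).foldl
        (fun s j => s.add |PySem.List.pyGetD hf i 0 - PySem.List.pyGetD hf j 0|) s)
      PySem.Set.empty
  let out :=
    (PySem.List.pyRange 0 (PySem.List.len vf - 1)).foldl
      (fun out i => (PySem.List.pyRange (i + 1) (PySem.List.len vf)).foldl
        (fun out j =>
          let side := |PySem.List.pyGetD vf i 0 - PySem.List.pyGetD vf j 0|
          if diffSet.contains side then max out (side * side) else out) out)
      (-1)
  if out ≠ -1 then PySem.Int.mod out pvMOD else -1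

-- ===== PORT B =====
-- Source B's gaps: peel the head, union in its differences with the rest, loop on the rest
def pvGaps : List Int → PySem.Set Int → PySem.Set Int
  | [], ds => ds
  | p :: pts, ds => pvGaps pts (ds.union (pts.map (fun q => q - p)))

-- Source B's sides_desc: sorted(gaps(sorted(fences + [1, edge])), reverse=True)
def pvSidesDesc (fences : List Int) (edge : Int) : List Int :=
  PySem.List.sorted
    (pvGaps (PySem.List.sorted (fences ++ [1, edge]) (fun x => x) false) PySem.Set.empty)
    (fun x => x) true

-- Source B's two-pointer while loop over the two descending lists (i/j walk = suffix recursion)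
def pvTP : List Int → List Int → Option Int
  | [], _ => none
  | _ :: _, [] => none
  | x :: xs, y :: ys =>
    if x = y then some x
    else if x > y then pvTP xs (y :: ys)
    else pvTP (x :: xs) ys
termination_by xs ys => xs.length + ys.length

def patto_bear_alt (m : Int) (n : Int) (h_fences : List Int) (v_fences : List Int) : Int :=
  let hs := pvSidesDesc h_fences m
  let vs := pvSidesDesc v_fences n
  match pvTP hs vs with
  | none => -1
  | some s => PySem.Int.mod (s * s) pvMOD

-- ===== PRECONDITION & SPEC =====
def Spec_patto_bear (m : Int) (n : Int) (h_fences : List Int) (v_fences : List Int) (out : Int) : Prop := out = patto_bear_alt m n h_fences v_fences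
instance (m : Int) (n : Int) (h_fences : List Int) (v_fences : List Int) (out : Int) : Decidable (Spec_patto_bear m n h_fences v_fences out) := by unfold Spec_patto_bear; infer_instance

-- ===== CLAIM (what is proved, stated in full; the proofs are below) =====
def Claim_equal_patto_bear : Prop := ∀ (m : Int) (n : Int) (h_fences : List Int) (v_fences : List Int), Dom_patto_bear m n h_fences v_fences → Spec_patto_bear m n h_fences v_fences (patto_bear m n h_fences v_fences)

-- ===== LEMMAS AND PROOFS =====

-- all |xs[i] - xs[j]| for i < j, head first (characterises A's difference loops)
def pvPairList : List Int → List Int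
  | [] => []
  | a :: t => t.map (fun b => |a - b|) ++ pvPairList t

lemma pvShift {β : Type} (F : β → Int → β) (lo T : Int) (acc : β) :
    (PySem.List.pyRange (lo + 1) (T + 1)).foldl F acc
      = (PySem.List.pyRange lo T).foldl (fun acc k => F acc (k + 1)) acc := by
  rw [PySem.List.pyRange_one, PySem.List.pyRange_one]
  have h : (T + 1 - (lo + 1)).toNat = (T - lo).toNat := by omega
  rw [h, List.foldl_map, List.foldl_map]
  refine PySem.List.foldl_congr_mem _ _ _ _ (fun acc k _ => ?_)
  congr 1; ring

lemma pvGetD_cons (a : Int) (t : List Int) {k : Int} (hk : 0 ≤ k) :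
    PySem.List.pyGetD (a :: t) (k + 1) 0 = PySem.List.pyGetD t k 0 := by
  rw [PySem.List.pyGetD_of_nonneg _ _ (by omega), PySem.List.pyGetD_of_nonneg _ _ hk]
  have h : (k + 1).toNat = k.toNat + 1 := by omega
  rw [h]; rfl

lemma pvTri {β : Type} (f : β → Int → β) :
    ∀ (xs : List Int) (init : β),
    (PySem.List.pyRange 0 ((xs.length : Int) - 1)).foldl
      (fun acc i => (PySem.List.pyRange (i + 1) (xs.length : Int)).foldl
        (fun acc j => f acc |PySem.List.pyGetD xs i 0 - PySem.List.pyGetD xs j 0|) acc) init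
      = (pvPairList xs).foldl f init := by
  intro xs
  induction xs with
  | nil => intro init; rw [PySem.List.pyRange_one_eq_nil (by simp)]; rfl
  | cons a t ih =>
    intro init
    rcases eq_or_ne t [] with rfl | ht
    · rw [show ((([a] : List Int).length : Int) - 1) = 0 by simp,
        PySem.List.pyRange_one_eq_nil le_rfl]
      rfl
    · have hT : 0 < (t.length : Int) := by
        have := List.length_pos_iff.mpr ht; omega
      have hlen : (((a :: t).length : Int) - 1) = (t.length : Int) := by
        simp
      rw [hlen, PySem.List.pyRange_one_cons hT, List.foldl_cons]
      have hfirst :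
          (PySem.List.pyRange (0 + 1) ((a :: t).length : Int)).foldl
            (fun acc j => f acc |PySem.List.pyGetD (a :: t) 0 0 - PySem.List.pyGetD (a :: t) j 0|) init
          = (t.map (fun b => |a - b|)).foldl f init := by
        rw [PySem.List.foldl_pyRange_pyGetD' (a :: t) 0
            (fun acc y => f acc |PySem.List.pyGetD (a :: t) 0 0 - y|) init (by norm_num)]
        rw [List.foldl_map]
        simp [PySem.List.pyGetD_of_nonneg]
      rw [hfirst]
      have hrest : ∀ acc : β,
          (PySem.List.pyRange (0 + 1) (t.length : Int)).foldl
            (fun acc i => (PySem.List.pyRange (i + 1) ((a :: t).length : Int)).foldl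
              (fun acc j => f acc |PySem.List.pyGetD (a :: t) i 0 - PySem.List.pyGetD (a :: t) j 0|) acc) acc
          = (pvPairList t).foldl f acc := by
        intro acc
        have hsplit : (t.length : Int) = ((t.length : Int) - 1) + 1 := by ring
        rw [hsplit, pvShift]
        rw [← ih acc]
        refine PySem.List.foldl_congr_mem _ _ _ _ (fun acc k hk => ?_)
        have hk0 : 0 ≤ k := by
          rcases (PySem.List.mem_pyRange_one).1 hk with ⟨h1, _⟩; exact h1
        try beta_reduce
        have hcast : (((a :: t).length : Int)) = (t.length : Int) + 1 := by simp
        rw [hcast, pvShift]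
        refine PySem.List.foldl_congr_mem _ _ _ _ (fun acc j hj => ?_)
        have hj0 : 0 ≤ j := by
          rcases (PySem.List.mem_pyRange_one).1 hj with ⟨h1, _⟩; omega
        try beta_reduce
        rw [pvGetD_cons a t hk0, pvGetD_cons a t hj0]
      rw [hrest]
      rw [pvPairList, List.foldl_append, List.foldl_map]

lemma pvPairList_nonneg : ∀ (xs : List Int), ∀ x ∈ pvPairList xs, 0 ≤ x := by
  intro xs
  induction xs with
  | nil => intro x hx; simp [pvPairList] at hx
  | cons a t ih =>
    intro x hx
    rw [pvPairList, List.mem_append] at hx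
    rcases hx with hx | hx
    · rcases List.mem_map.1 hx with ⟨b, _, rfl⟩; exact abs_nonneg _
    · exact ih x hx

lemma pvFoldAdd (l : List Int) :
    l.foldl (fun (s : PySem.Set Int) x => s.add x) PySem.Set.empty = PySem.Set.ofList l := by
  rw [PySem.Set.ofList_eq_foldl]; rfl

-- the running max of areas over sides present in S equals the squared max of the intersection
lemma pvMaxArea (S : PySem.Set Int) (L : List Int) (hL : ∀ x ∈ L, 0 ≤ x) :
    (if L.foldl (fun o s => if S.contains s then max o (s * s) else o) (-1) ≠ -1
     then PySem.Int.mod (L.foldl (fun o s => if S.contains s then max o (s * s) else o) (-1)) pvMOD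
     else -1)
    = (match PySem.List.max? (S.inter (PySem.Set.ofList L)) (fun x => x) with
       | none => -1
       | some mx => PySem.Int.mod (mx ^ 2) pvMOD) := by
  have hfold : L.foldl (fun o s => if S.contains s then max o (s * s) else o) (-1)
      = (L.filter (fun s => S.contains s)).foldl (fun o s => max o (s * s)) (-1) :=
    PySem.List.foldl_if_eq_foldl_filter (fun s => S.contains s) (fun o s => max o (s * s)) L (-1)
  cases hC : PySem.List.max? (S.inter (PySem.Set.ofList L)) (fun x => x) with
  | none =>
    have hCnil : S.inter (PySem.Set.ofList L) = [] := (PySem.List.max?_eq_none_iff _ _).1 hC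
    have hFnil : L.filter (fun s => S.contains s) = [] := by
      rw [List.filter_eq_nil_iff]
      intro x hx hcx
      have hxC : x ∈ S.inter (PySem.Set.ofList L) :=
        (PySem.Set.mem_inter _ _ _).2 ⟨(PySem.Set.contains_iff _ _).1 hcx,
          (PySem.Set.mem_ofList _ _).2 hx⟩
      rw [hCnil] at hxC; exact absurd hxC (List.not_mem_nil)
    rw [hfold, hFnil]
    simp
  | some M =>
    have hMC : M ∈ S.inter (PySem.Set.ofList L) := PySem.List.max?_mem hC
    have hMSL : M ∈ S ∧ M ∈ L := by
      rcases (PySem.Set.mem_inter _ _ _).1 hMC with ⟨h1, h2⟩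
      exact ⟨h1, (PySem.Set.mem_ofList _ _).1 h2⟩
    have hM0 : 0 ≤ M := hL M hMSL.2
    set F := L.filter (fun s => S.contains s) with hF
    have hMF : M ∈ F := by
      rw [hF, List.mem_filter]
      exact ⟨hMSL.2, (PySem.Set.contains_iff _ _).2 hMSL.1⟩
    set out := F.foldl (fun o s => max o (s * s)) (-1) with hout
    have h1 : M * M ≤ out :=
      (PySem.List.le_foldl_max_int F (fun s => s * s) (-1)).2 M hMF
    have h2 : out ≤ M * M := by
      have hmap : out = (F.map (fun s => s * s)).foldl max (-1) := by
        rw [hout, List.foldl_map]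
      rcases PySem.List.foldl_max_mem (F.map (fun s => s * s)) (-1) with h | h
      · exfalso
        rw [hmap] at h1
        rw [h] at h1
        nlinarith [mul_nonneg hM0 hM0]
      · rw [hmap]
        rcases List.mem_map.1 h with ⟨f, hfF, hfe⟩
        rw [← hfe]
        have hfL : f ∈ L ∧ S.contains f := by
          rw [hF] at hfF; rcases List.mem_filter.1 hfF with ⟨ha, hb⟩; exact ⟨ha, hb⟩
        have hfC : f ∈ S.inter (PySem.Set.ofList L) :=
          (PySem.Set.mem_inter _ _ _).2 ⟨(PySem.Set.contains_iff _ _).1 hfL.2,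
            (PySem.Set.mem_ofList _ _).2 hfL.1⟩
        have hfM : f ≤ M := PySem.List.max?_isMax hC f hfC
        have hf0 : 0 ≤ f := hL f hfL.1
        exact mul_le_mul hfM hfM hf0 hM0
    have houtM : out = M * M := le_antisymm h2 h1
    have hMM : M * M ≠ -1 := by nlinarith [mul_nonneg hM0 hM0]
    rw [hfold, houtM, if_pos hMM, ← pow_two]

-- ===== B-side lemmas =====

-- all xs[j] - xs[i] for i < j, head first (characterises B's gaps loop)
def pvPairs2 : List Int → List Int
  | [] => []
  | p :: t => t.map (fun q => q - p) ++ pvPairs2 t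

lemma pvGaps_mem : ∀ (xs : List Int) (ds : PySem.Set Int) (x : Int),
    x ∈ pvGaps xs ds ↔ x ∈ ds ∨ x ∈ pvPairs2 xs := by
  intro xs
  induction xs with
  | nil => intro ds x; simp [pvGaps, pvPairs2]
  | cons p t ih =>
    intro ds x
    rw [pvGaps, ih, PySem.Set.mem_union, pvPairs2, List.mem_append]
    tauto

lemma pvGaps_nodup : ∀ (xs : List Int) (ds : PySem.Set Int), ds.Nodup → (pvGaps xs ds).Nodup := by
  intro xs
  induction xs with
  | nil => intro ds h; exact h
  | cons p t ih => intro ds h; exact ih _ (PySem.Set.nodup_union _ _ h)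

-- on an ascending list the directed gaps ARE A's absolute differences
lemma pvPairs2_eq_of_sorted : ∀ (xs : List Int), xs.Pairwise (· ≤ ·) →
    pvPairs2 xs = pvPairList xs := by
  intro xs
  induction xs with
  | nil => intro _; rfl
  | cons a t ih =>
    intro h
    rw [pvPairs2, pvPairList, ih (List.Pairwise.of_cons h)]
    congr 1
    refine List.map_congr_left (fun b hb => ?_)
    have hab : a ≤ b := List.rel_of_pairwise_cons h hb
    rw [abs_of_nonpos (by omega)]
    ring

-- membership in the absolute pairwise differences is invariant under permutation
lemma pvSwap (a b : Int) (l : List Int) :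
    (pvPairList (a :: b :: l)).Perm (pvPairList (b :: a :: l)) := by
  simp only [pvPairList, List.map_cons, List.cons_append]
  rw [abs_sub_comm a b]
  exact List.Perm.cons _ (List.perm_append_comm_assoc _ _ _)

lemma pvPairList_perm : ∀ {xs ys : List Int}, xs.Perm ys →
    (pvPairList xs).Perm (pvPairList ys) := by
  intro xs ys h
  induction h with
  | nil => exact List.Perm.refl _
  | cons a h ih =>
    rw [pvPairList, pvPairList]
    exact List.Perm.append (h.map _) ih
  | swap x y l => exact pvSwap y x l
  | trans h1 h2 ih1 ih2 => exact ih1.trans ih2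

-- membership in B's descending side list = membership in A's difference list
lemma pvSidesDesc_mem (fences : List Int) (edge : Int) (x : Int) :
    x ∈ pvSidesDesc fences edge ↔ x ∈ pvPairList (fences ++ [1, edge]) := by
  unfold pvSidesDesc
  rw [PySem.List.mem_sorted, pvGaps_mem]
  have hp : (PySem.List.sorted (fences ++ [1, edge]) (fun x => x) false).Pairwise (· ≤ ·) := by
    have := PySem.List.sorted_pairwise (fences ++ [1, edge]) (fun x => x)
    simpa using this
  rw [pvPairs2_eq_of_sorted _ hp]
  have hperm := pvPairList_perm (PySem.List.sorted_perm (fences ++ [1, edge]) (fun x => x) false)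
  constructor
  · rintro (h | h)
    · exact absurd h (List.not_mem_nil)
    · exact hperm.mem_iff.1 h
  · intro h; exact Or.inr (hperm.mem_iff.2 h)

-- B's side list is strictly descending
lemma pvSidesDesc_sorted (fences : List Int) (edge : Int) :
    (pvSidesDesc fences edge).Pairwise (· > ·) := by
  unfold pvSidesDesc
  set S := pvGaps (PySem.List.sorted (fences ++ [1, edge]) (fun x => x) false) PySem.Set.empty with hS
  have hge : (PySem.List.sorted S (fun x => x) true).Pairwise (fun a b => b ≤ a) := by
    have := PySem.List.sorted_pairwise_rev S (fun x => x)
    simpa using this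
  have hnd : (PySem.List.sorted S (fun x => x) true).Nodup := by
    have hSnd : S.Nodup := pvGaps_nodup _ _ List.nodup_nil
    exact (PySem.List.sorted_perm S (fun x => x) true).nodup_iff.2 hSnd
  have := hge.and hnd
  exact this.imp (fun {a b} h => lt_of_le_of_ne h.1 (Ne.symm h.2))

-- two-pointer correctness on strictly descending lists
lemma pvTP_spec : ∀ (xs ys : List Int), xs.Pairwise (· > ·) → ys.Pairwise (· > ·) →
    ((∀ z, pvTP xs ys = some z → z ∈ xs ∧ z ∈ ys ∧ ∀ w, w ∈ xs → w ∈ ys → w ≤ z)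
     ∧ (pvTP xs ys = none → ∀ w, w ∈ xs → w ∉ ys)) := by
  intro xs ys
  fun_induction pvTP xs ys with
  | case1 ys =>
    intro _ _
    exact ⟨fun z hz => by simp at hz, fun _ w hw => absurd hw (List.not_mem_nil)⟩
  | case2 x xs =>
    intro _ _
    exact ⟨fun z hz => by simp at hz, fun _ w _ hw => absurd hw (List.not_mem_nil)⟩
  | case3 xs x ys =>
    intro hx hy
    refine ⟨fun z hz => ?_, fun hn => by simp at hn⟩
    rw [Option.some_inj] at hz
    subst hz
    refine ⟨List.mem_cons_self, List.mem_cons_self, fun w hw _ => ?_⟩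
    rcases List.mem_cons.1 hw with rfl | hw
    · exact le_refl _
    · exact le_of_lt (List.rel_of_pairwise_cons hx hw)
  | case4 x xs y ys hne hgt ih =>
    intro hx hy
    have ihr := ih (List.Pairwise.of_cons hx) hy
    have hxnot : x ∉ y :: ys := by
      intro hmem
      rcases List.mem_cons.1 hmem with rfl | hmem
      · exact hne rfl
      · exact absurd (List.rel_of_pairwise_cons hy hmem) (by omega)
    constructor
    · intro z hz
      rcases ihr.1 z hz with ⟨h1, h2, h3⟩
      refine ⟨List.mem_cons_of_mem _ h1, h2, fun w hw hw2 => ?_⟩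
      rcases List.mem_cons.1 hw with rfl | hw
      · exact absurd hw2 hxnot
      · exact h3 w hw hw2
    · intro hn w hw hw2
      rcases List.mem_cons.1 hw with rfl | hw
      · exact hxnot hw2
      · exact ihr.2 hn w hw hw2
  | case5 x xs y ys hne hle ih =>
    intro hx hy
    have hxy : x < y := by omega
    have ihr := ih hx (List.Pairwise.of_cons hy)
    have hynot : y ∉ x :: xs := by
      intro hmem
      rcases List.mem_cons.1 hmem with rfl | hmem
      · exact hne rfl
      · exact absurd (List.rel_of_pairwise_cons hx hmem) (by omega)
    constructor
    · intro z hz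
      rcases ihr.1 z hz with ⟨h1, h2, h3⟩
      refine ⟨h1, List.mem_cons_of_mem _ h2, fun w hw hw2 => ?_⟩
      rcases List.mem_cons.1 hw2 with rfl | hw2
      · exact absurd hw hynot
      · exact h3 w hw hw2
    · intro hn w hw hw2
      rcases List.mem_cons.1 hw2 with rfl | hw2
      · exact hynot hw
      · exact ihr.2 hn w hw hw2

-- ===== VERDICT (by name: the statement is the Claim_ definition above) =====
theorem patto_bear_spec : Claim_equal_patto_bear := by
  intro m n h_fences v_fences _
  unfold Spec_patto_bear patto_bear patto_bear_alt
  simp only [PySem.List.len_eq]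
  simp only [pvTri (fun (s : PySem.Set Int) x => s.add x) (h_fences ++ [1, m]),
    pvFoldAdd]
  simp only [pvTri (fun (o : Int) side =>
      if (PySem.Set.ofList (pvPairList (h_fences ++ [1, m]))).contains side
      then max o (side * side) else o) (v_fences ++ [1, n])]
  rw [pvMaxArea _ _ (pvPairList_nonneg _)]
  -- both sides are now expressed through the common sides; compare the two selections
  show _ = match pvTP (pvSidesDesc h_fences m) (pvSidesDesc v_fences n) with
    | none => (-1 : Int)
    | some s => PySem.Int.mod (s * s) pvMOD
  set hA := pvPairList (h_fences ++ [1, m]) with hhA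
  set vA := pvPairList (v_fences ++ [1, n]) with hvA
  set C := (PySem.Set.ofList hA).inter (PySem.Set.ofList vA) with hC
  have hmemC : ∀ z, z ∈ C ↔ z ∈ hA ∧ z ∈ vA := by
    intro z
    rw [hC, PySem.Set.mem_inter, PySem.Set.mem_ofList, PySem.Set.mem_ofList]
  have hmemh : ∀ z, z ∈ pvSidesDesc h_fences m ↔ z ∈ hA := fun z => pvSidesDesc_mem _ _ z
  have hmemv : ∀ z, z ∈ pvSidesDesc v_fences n ↔ z ∈ vA := fun z => pvSidesDesc_mem _ _ z
  have htp := pvTP_spec (pvSidesDesc h_fences m) (pvSidesDesc v_fences n)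
    (pvSidesDesc_sorted _ _) (pvSidesDesc_sorted _ _)
  cases htpv : pvTP (pvSidesDesc h_fences m) (pvSidesDesc v_fences n) with
  | none =>
    have hCnil : C = [] := by
      refine List.eq_nil_iff_forall_not_mem.2 (fun c hc => ?_)
      rcases (hmemC c).1 hc with ⟨h1, h2⟩
      exact htp.2 htpv c ((hmemh c).2 h1) ((hmemv c).2 h2)
    rw [(PySem.List.max?_eq_none_iff C (fun x => x)).2 hCnil]
  | some z =>
    rcases htp.1 z htpv with ⟨hz1, hz2, hzmax⟩
    have hzC : z ∈ C := (hmemC z).2 ⟨(hmemh z).1 hz1, (hmemv z).1 hz2⟩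
    cases hmx : PySem.List.max? C (fun x => x) with
    | none =>
      exact absurd hzC (by rw [(PySem.List.max?_eq_none_iff C (fun x => x)).1 hmx]; exact List.not_mem_nil)
    | some mx =>
      have hmxC : mx ∈ C := PySem.List.max?_mem hmx
      rcases (hmemC mx).1 hmxC with ⟨hmx1, hmx2⟩
      have h1 : z ≤ mx := PySem.List.max?_isMax hmx z hzC
      have h2 : mx ≤ z := hzmax mx ((hmemh mx).2 hmx1) ((hmemv mx).2 hmx2)
      have hmz : mx = z := le_antisymm h2 h1
      show PySem.Int.mod (mx ^ 2) pvMOD = PySem.Int.mod (z * z) pvMOD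
      rw [hmz, pow_two]
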